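-- pv_equiv track=rewrite | github.com/Romain-Grosos/MyGuildManager | app/cogs/guild_groups_creation.py | _calculate_group_role_needs
-- ===== SOURCE A (Python) =====
-- IDEAL_TANKS_PER_GROUP = 1
--
-- IDEAL_HEALERS_PER_GROUP = 2
--
-- def _calculate_group_role_needs(group: list[dict]) -> dict[str, int]:
--     """
--     Calculate how many tanks and healers a group is missing for optimal composition.
--
--     Args:
--         group: List of member dictionaries with class information
--
--     Returns:
--         Dictionary with 'tanks_needed' and 'healers_needed' counts
--     """
--     current_tanks = sum(1 for member in group if member.get("class") == "Tank")
--     current_healers = sum(1 for member in group if member.get("class") == "Healer")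
--
--     tanks_needed = max(0, IDEAL_TANKS_PER_GROUP - current_tanks)
--     healers_needed = max(0, IDEAL_HEALERS_PER_GROUP - current_healers)
--
--     return {
--         "tanks_needed": tanks_needed,
--         "healers_needed": healers_needed
--     }
-- ===== SOURCE B (Python) =====
-- IDEAL_TANKS_PER_GROUP = 1
--
-- IDEAL_HEALERS_PER_GROUP = 2
--
-- def _calculate_group_role_needs(group: list[dict]) -> dict[str, int]:
--     # Instead of counting occurrences and clamping with max(0, ...), walk the
--     # group once while decrementing the remaining need for each role as a
--     # matching member consumes a slot, and stop early once both needs hit zero.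
--     tanks = IDEAL_TANKS_PER_GROUP
--     healers = IDEAL_HEALERS_PER_GROUP
--     for member in group:
--         if tanks == 0 and healers == 0:
--             break
--         c = member.get("class")
--         if c == "Tank" and tanks > 0:
--             tanks -= 1
--         elif c == "Healer" and healers > 0:
--             healers -= 1
--     return {"tanks_needed": tanks, "healers_needed": healers}
-- ===== Notes on version B (the rewrite author's own statement) =====
-- stated objective: alternative
-- what changed: Replaces A's two counting scans plus max(0,...) clamping by a single slot-consuming pass that decrements the remaining need per matching member and exits early once both needs reach zero, so no counts and no clamping are ever computed.
import Mathlib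
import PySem

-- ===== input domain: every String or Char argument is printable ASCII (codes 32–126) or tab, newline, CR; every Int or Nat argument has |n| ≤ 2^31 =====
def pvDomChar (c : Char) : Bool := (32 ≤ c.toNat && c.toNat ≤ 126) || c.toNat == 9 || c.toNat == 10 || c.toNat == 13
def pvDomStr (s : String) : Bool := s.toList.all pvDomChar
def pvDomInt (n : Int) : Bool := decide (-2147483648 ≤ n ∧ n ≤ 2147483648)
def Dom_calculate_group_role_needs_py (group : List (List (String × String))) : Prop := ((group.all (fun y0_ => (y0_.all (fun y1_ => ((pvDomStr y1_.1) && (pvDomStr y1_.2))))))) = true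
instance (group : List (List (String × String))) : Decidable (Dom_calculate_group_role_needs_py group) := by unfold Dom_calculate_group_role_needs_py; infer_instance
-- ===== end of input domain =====

-- B replaces A's two counting scans + max(0,·) clamping by one slot-consuming pass with early exit (alternative; same O(n) cost).

-- ===== PORT A =====
-- member.get("class"): first-match lookup in the member association list
def pvGetClass (m : List (String × String)) : Option String :=
  (PySem.Dict.mk m).get? "class"

def calculate_group_role_needs_py (group : List (List (String × String))) : List (String × Int) :=
  let current_tanks : Int :=
    group.foldl (fun a member => if pvGetClass member == some "Tank" then a + 1 else a) 0
  let current_healers : Int :=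
    group.foldl (fun a member => if pvGetClass member == some "Healer" then a + 1 else a) 0
  let tanks_needed := max 0 (1 - current_tanks)
  let healers_needed := max 0 (2 - current_healers)
  [("tanks_needed", tanks_needed), ("healers_needed", healers_needed)]

-- ===== PORT B =====
-- Source B's loop: decrement the remaining need for a matching member; break once both are 0.
def altLoop : List (List (String × String)) → Int → Int → Int × Int
  | [], tanks, healers => (tanks, healers)
  | member :: rest, tanks, healers =>
    if tanks == 0 && healers == 0 then (tanks, healers)
    else
      let c := pvGetClass member
      if c == some "Tank" && decide (0 < tanks) then altLoop rest (tanks - 1) healers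
      else if c == some "Healer" && decide (0 < healers) then altLoop rest tanks (healers - 1)
      else altLoop rest tanks healers

def calculate_group_role_needs_py_alt (group : List (List (String × String))) : List (String × Int) :=
  let r := altLoop group 1 2
  [("tanks_needed", r.1), ("healers_needed", r.2)]

-- ===== PRECONDITION & SPEC =====
def Spec_calculate_group_role_needs_py (group : List (List (String × String))) (out : List (String × Int)) : Prop := out = calculate_group_role_needs_py_alt group
instance (group : List (List (String × String))) (out : List (String × Int)) : Decidable (Spec_calculate_group_role_needs_py group out) := by unfold Spec_calculate_group_role_needs_py; infer_instance

-- ===== CLAIM (what is proved, stated in full; the proofs are below) =====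
def Claim_equal_calculate_group_role_needs_py : Prop := ∀ (group : List (List (String × String))), Dom_calculate_group_role_needs_py group → Spec_calculate_group_role_needs_py group (calculate_group_role_needs_py group)

-- ===== LEMMAS AND PROOFS =====
-- A's conditional-sum loop counts occurrences of s among the looked-up classes.
theorem foldl_if_count (f : List (String × String) → Option String) (s : String) :
    ∀ (l : List (List (String × String))) (a : Int),
      l.foldl (fun a m => if f m == some s then a + 1 else a) a
        = a + ((l.map f).count (some s) : Int) := by
  intro l
  induction l with
  | nil => intro a; simp
  | cons x xs ih =>
    intro a
    simp only [List.foldl_cons, List.map_cons, List.count_cons]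
    rw [ih]
    by_cases h : f x == some s
    · simp [h]; ring
    · simp [h]

-- B's slot-consuming loop ends at the clamped difference of quota and count.
theorem altLoop_eq :
    ∀ (l : List (List (String × String))) (t h : Int), 0 ≤ t → 0 ≤ h →
      altLoop l t h
        = (max 0 (t - ((l.map pvGetClass).count (some "Tank") : Int)),
           max 0 (h - ((l.map pvGetClass).count (some "Healer") : Int))) := by
  intro l
  induction l with
  | nil => intro t h ht hh; simp [altLoop]; omega
  | cons x xs ih =>
    intro t h ht hh
    simp only [altLoop, List.map_cons, List.count_cons]
    by_cases hz : t = 0 ∧ h = 0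
    · obtain ⟨h1, h2⟩ := hz
      subst h1; subst h2
      simp; omega
    · have hz' : (t == 0 && h == 0) = false := by
        simp only [Bool.and_eq_false_iff, beq_eq_false_iff_ne]
        omega
      rw [hz']
      simp only [Bool.false_eq_true, if_false]
      by_cases hT : pvGetClass x = some "Tank"
      · by_cases hpt : 0 < t
        · have : (pvGetClass x == some "Tank" && decide (0 < t)) = true := by
            simp [hT, hpt]
          rw [this]
          simp only [if_true]
          rw [ih (t - 1) h (by omega) hh]
          simp [hT]
          omega
        · have e1 : (pvGetClass x == some "Tank" && decide (0 < t)) = false := by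
            simp [hpt]
          have e2 : (pvGetClass x == some "Healer" && decide (0 < h)) = false := by
            simp [hT]
          rw [e1, e2]
          simp only [Bool.false_eq_true, if_false]
          rw [ih t h ht hh]
          simp [hT]
          omega
      · by_cases hH : pvGetClass x = some "Healer"
        · have e1 : (pvGetClass x == some "Tank" && decide (0 < t)) = false := by
            simp [hT]
          rw [e1]
          simp only [Bool.false_eq_true, if_false]
          by_cases hph : 0 < h
          · have : (pvGetClass x == some "Healer" && decide (0 < h)) = true := by
              simp [hH, hph]
            rw [this]
            simp only [if_true]
            rw [ih t (h - 1) ht (by omega)]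
            simp [hH]
            omega
          · have : (pvGetClass x == some "Healer" && decide (0 < h)) = false := by
              simp [hph]
            rw [this]
            simp only [Bool.false_eq_true, if_false]
            rw [ih t h ht hh]
            simp [hH]
            omega
        · have e1 : (pvGetClass x == some "Tank" && decide (0 < t)) = false := by
            simp [hT]
          have e2 : (pvGetClass x == some "Healer" && decide (0 < h)) = false := by
            simp [hH]
          rw [e1, e2]
          simp only [Bool.false_eq_true, if_false]
          rw [ih t h ht hh]
          simp [hT, hH]

-- ===== VERDICT (by name: the statement is the Claim_ definition above) =====
theorem calculate_group_role_needs_py_spec : Claim_equal_calculate_group_role_needs_py := by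
  intro group _
  unfold Spec_calculate_group_role_needs_py calculate_group_role_needs_py calculate_group_role_needs_py_alt
  rw [altLoop_eq group 1 2 (by omega) (by omega)]
  simp only [foldl_if_count pvGetClass, Int.zero_add]
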